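-- pv_equiv track=rewrite | github.com/keithrozario/advent-of-code | 09/solution.py | find_last_file
-- ===== SOURCE A (Python) =====
-- def find_last_file(physical_map, processed_file_ids):
--     """
--     Args:
--         physical_map: the map of the current list
--         processed_file_ids: list of file ids that have already been processed
--     returns:
--         the location and id of the last file
--         ignores any files already processed in 'processed_file_ids'
--     """
--
--     for i in range(len(physical_map)-1, -1, -1):
--         if physical_map[i] != '.':
--             if physical_map[i] not in processed_file_ids:
--                 last_file_location = i
--                 last_file_id = physical_map[i]
--                 break
--
--     return last_file_location, last_file_id
-- ===== SOURCE B (Python) =====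
-- def find_last_file(physical_map, processed_file_ids):
--     """
--     Forward single pass: overwrite with every qualifying element, so the
--     last qualifying (position, id) survives.  Membership is checked against
--     a set built once.  If nothing qualifies, the locals stay unbound and the
--     same UnboundLocalError as in A is raised.
--     """
--     skip = set(processed_file_ids)
--     for i, block in enumerate(physical_map):
--         if block != '.' and block not in skip:
--             last_file_location = i
--             last_file_id = block
--     return last_file_location, last_file_id
-- ===== Notes on version B (the rewrite author's own statement) =====
-- stated objective: alternative
-- what changed: Backward scan with break replaced by a forward full scan over enumerate that overwrites an accumulator with each qualifying element (keeping the last), with membership tested against a set built once instead of the list.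
import Mathlib
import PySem

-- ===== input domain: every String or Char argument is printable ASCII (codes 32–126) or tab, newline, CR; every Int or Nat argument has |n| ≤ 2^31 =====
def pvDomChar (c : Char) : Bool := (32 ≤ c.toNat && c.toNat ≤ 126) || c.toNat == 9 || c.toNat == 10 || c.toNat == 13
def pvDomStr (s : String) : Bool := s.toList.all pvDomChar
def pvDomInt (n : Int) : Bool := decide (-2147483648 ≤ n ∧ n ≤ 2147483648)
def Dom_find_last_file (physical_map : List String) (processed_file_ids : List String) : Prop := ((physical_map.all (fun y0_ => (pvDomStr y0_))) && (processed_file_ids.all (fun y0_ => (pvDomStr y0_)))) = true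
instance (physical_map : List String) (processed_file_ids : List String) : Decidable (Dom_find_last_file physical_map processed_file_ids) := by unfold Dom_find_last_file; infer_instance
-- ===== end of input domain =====

-- B replaces A's backward scan-with-break by a forward fold over enumerate that keeps the
-- last qualifying element (membership against a set built once); same return value on Pre_.


-- ===== PORT A =====
-- loop 'for i in range(len(pm)-1, -1, -1)': recursion on k = i+1, visiting i = k-1, k-2, …, 0.
-- Falling off the loop without a break leaves the locals unbound (UnboundLocalError):
-- that case is the (0, "") default, excluded by Pre_find_last_file.
def find_last_file_loopA (physical_map : List String) (processed_file_ids : List String) : Nat → Int × String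
  | 0 => (0, "")
  | Nat.succ k =>
      match PySem.List.pyGet? physical_map (k : Int) with
      | none => (0, "")   -- unreachable: k < len(physical_map)
      | some s =>
          if s ≠ "." then
            if ¬ processed_file_ids.contains s then ((k : Int), s)
            else find_last_file_loopA physical_map processed_file_ids k
          else find_last_file_loopA physical_map processed_file_ids k

def find_last_file (physical_map : List String) (processed_file_ids : List String) : Int × String :=
  find_last_file_loopA physical_map processed_file_ids physical_map.length

-- ===== PORT B =====
-- forward fold over enumerate(pm), overwriting an accumulator with each qualifying element;
-- 'none' at the end = the unbound locals of Source B (UnboundLocalError), excluded by Pre_.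
def find_last_file_alt (physical_map : List String) (processed_file_ids : List String) : Int × String :=
  let skip := PySem.Set.ofList processed_file_ids
  ((PySem.List.enumerate physical_map 0).foldl
      (fun acc p => if p.2 ≠ "." ∧ ¬ PySem.Set.contains skip p.2 then some p else acc)
      (none : Option (Int × String))).getD (0, "")

-- ===== PRECONDITION & SPEC =====
-- A (and B) raise UnboundLocalError when no element qualifies; Pre_ excludes exactly that.
def Pre_find_last_file (physical_map : List String) (processed_file_ids : List String) : Prop :=
  ∃ s ∈ physical_map, s ≠ "." ∧ s ∉ processed_file_ids
instance (physical_map : List String) (processed_file_ids : List String) : Decidable (Pre_find_last_file physical_map processed_file_ids) := by unfold Pre_find_last_file; infer_instance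
def pvWitness_find_last_file : List String × List String := (["0", ".", "1"], ["1"])

def Spec_find_last_file (physical_map : List String) (processed_file_ids : List String) (out : Int × String) : Prop := out = find_last_file_alt physical_map processed_file_ids
instance (physical_map : List String) (processed_file_ids : List String) (out : Int × String) : Decidable (Spec_find_last_file physical_map processed_file_ids out) := by unfold Spec_find_last_file; infer_instance

-- ===== CLAIM (what is proved, stated in full; the proofs are below) =====
def Claim_equal_find_last_file : Prop := ∀ (physical_map : List String) (processed_file_ids : List String), Dom_find_last_file physical_map processed_file_ids → Pre_find_last_file physical_map processed_file_ids → Spec_find_last_file physical_map processed_file_ids (find_last_file physical_map processed_file_ids)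

-- ===== LEMMAS AND PROOFS =====

-- the last qualifying (index, element) of l, indices starting at i
def lastQ (q : String → Prop) [DecidablePred q] : List String → Int → Option (Int × String)
  | [], _ => none
  | s :: rest, i => (lastQ q rest (i + 1)).or (if q s then some (i, s) else none)

theorem lastQ_append (q : String → Prop) [DecidablePred q] (l : List String) (x : String) (i : Int) :
    lastQ q (l ++ [x]) i = (if q x then some (i + l.length, x) else none).or (lastQ q l i) := by
  induction l generalizing i with
  | nil => simp [lastQ]
  | cons s rest ih =>
      simp only [List.cons_append, lastQ, ih, List.length_cons]
      rw [Option.or_assoc]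
      have h : i + (1 : Int) + rest.length = i + ((rest.length + 1 : Nat) : Int) := by push_cast; ring
      rw [h]

theorem foldl_lastQ (q : String → Prop) [DecidablePred q] (l : List String) (i : Int)
    (acc : Option (Int × String)) :
    (PySem.List.enumerate l i).foldl
        (fun acc p => if q p.2 then some p else acc) acc = (lastQ q l i).or acc := by
  induction l generalizing i acc with
  | nil => simp [lastQ, PySem.List.enumerate_nil]
  | cons s rest ih =>
      simp only [PySem.List.enumerate_cons, List.foldl_cons, lastQ, ih, Option.or_assoc]
      by_cases h : q s <;> simp [h]

theorem loopA_lastQ (physical_map processed_file_ids : List String) (k : Nat)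
    (hk : k ≤ physical_map.length) :
    find_last_file_loopA physical_map processed_file_ids k =
      (lastQ (fun s => s ≠ "." ∧ s ∉ processed_file_ids) (physical_map.take k) 0).getD (0, "") := by
  induction k with
  | zero => simp [find_last_file_loopA, lastQ]
  | succ k ih =>
      have hklt : k < physical_map.length := Nat.lt_of_succ_le hk
      have hget : PySem.List.pyGet? physical_map (k : Int) = some physical_map[k] := by
        simp [PySem.List.pyGet?_natCast, List.getElem?_eq_getElem hklt]
      have htake : physical_map.take (k + 1) = physical_map.take k ++ [physical_map[k]] := by
        rw [List.take_add_one, List.getElem?_eq_getElem hklt]; rfl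
      have hlen : ((physical_map.take k).length : Int) = (k : Int) := by
        simp [List.length_take, Nat.min_eq_left (Nat.le_of_lt hklt)]
      rw [show find_last_file_loopA physical_map processed_file_ids (k + 1) =
            (if physical_map[k] ≠ "." then
              if ¬ processed_file_ids.contains physical_map[k] then ((k : Int), physical_map[k])
              else find_last_file_loopA physical_map processed_file_ids k
            else find_last_file_loopA physical_map processed_file_ids k) by
          simp [find_last_file_loopA, hget]]
      rw [htake, lastQ_append, hlen]
      by_cases h1 : physical_map[k] = "." <;>
        by_cases h2 : physical_map[k] ∈ processed_file_ids <;>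
          simp [h1, h2, ih (Nat.le_of_lt hklt)]

theorem lastQ_congr (q1 q2 : String → Prop) [DecidablePred q1] [DecidablePred q2]
    (h : ∀ s, q1 s ↔ q2 s) (l : List String) (i : Int) : lastQ q1 l i = lastQ q2 l i := by
  induction l generalizing i with
  | nil => rfl
  | cons s rest ih =>
      simp only [lastQ, ih]
      congr 1
      exact if_congr (h s) rfl rfl

theorem alt_lastQ (physical_map processed_file_ids : List String) :
    find_last_file_alt physical_map processed_file_ids =
      (lastQ (fun s => s ≠ "." ∧ s ∉ processed_file_ids) physical_map 0).getD (0, "") := by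
  simp only [find_last_file_alt]
  rw [foldl_lastQ (fun s => s ≠ "." ∧ ¬ PySem.Set.contains (PySem.Set.ofList processed_file_ids) s),
      Option.or_none,
      lastQ_congr (fun s => s ≠ "." ∧ ¬ PySem.Set.contains (PySem.Set.ofList processed_file_ids) s)
        (fun s => s ≠ "." ∧ s ∉ processed_file_ids)
        (fun s => by simp [PySem.Set.contains, PySem.Set.mem_ofList])]

-- ===== VERDICT (by name: the statement is the Claim_ definition above) =====
theorem find_last_file_spec : Claim_equal_find_last_file := by
  intro pm proc _ _
  unfold Spec_find_last_file find_last_file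
  rw [loopA_lastQ pm proc pm.length (Nat.le_refl _), List.take_length, alt_lastQ]
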